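-- pv_equiv track=rewrite | github.com/ChristianHallerX/Python_Coding | Blind75/math_geometry/tetrisCoderPad.py | tetris
-- ===== SOURCE A (Python) =====
-- def tetris(field, figure):
--     """
--     Go though columns. Check if figure can be placed at coordinates, then check lower row.
--     If loop not broken, then create field copy, write figure into field and check for complete rows.
--     Return a column index that fits the figure and has a row with all 1s
--
--     Time Complexity: outer loop O(n),
--                     dropping O(m),
--                     checking O(1) constant 9 fields,
--                     copy field and 1-check O(m*n)
--                     -> Total O(m*n2)
--     Space Complexity: copy of field O(m * n)
--     """
--     height = len(field)
--     width = len(field[0])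
--
--     # Helper checks if figure position can be placed without colliding
--     def canPlace(r, c):
--         """
--         Return false if 'field' and 'figure' are both 1 in once cell (overlap, can't place)
--         Return True if only 'field' or 'figure' is 1
--         """
--         for i in range(3):
--             for j in range(3):
--                 # Only check cells that are part of the figure.
--                 if figure[i][j] == 1:
--                     if field[r + i][c + j] == 1:
--                         return False
--         return True
--
--     # Loop over columns. The figure's top-left must be max 3 cols from right edge of the field
--     for col in range(0, width - 3 + 1):
--         r = 0  # init top row for dropping
--
--         # Simulate dropping the figure in this col position using the candidate row
--         while True:
--             candidate_r = r + 1
--             # Break if the figure boundaries are outside the field boundaries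
--             if candidate_r + 3 > height:
--                 break
--             # Check if we can move the figure down by one row. Else break loop in this column
--             if not canPlace(candidate_r, col):
--                 break
--             r = candidate_r  # drop one row
--
--         # Figure can be placed in this column
--         # Create a copy of the field
--         new_field = [row[:] for row in field]
--
--         # Write the figure into the field
--         for i in range(3):
--             for j in range(3):
--                 if figure[i][j] == 1:
--                     new_field[r + i][col + j] = 1
--
--         # Check if any row in new_field is completely filled with 1's and return the col index
--         for row_line in new_field:
--             if all(cell == 1 for cell in row_line):
--                 return col
--
--     # Fail, no col found
--     return -1
-- ===== SOURCE B (Python) =====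
-- def tetris(field, figure):
--     """
--     Same result as the original, without copying the field per column.
--     Precompute per-row 'deficit' = number of cells != 1. A dropped figure
--     completes row r+i iff the figure's 1-cells in its row i cover exactly
--     deficit[r+i] non-1 field cells there.
--     """
--     height = len(field)
--     width = len(field[0])
--     if width < 3:
--         return -1
--     deficit = [sum(1 for cell in row if cell != 1) for row in field]
--     cells = [(i, j) for i in range(3) for j in range(3) if figure[i][j] == 1]
--     if 0 in deficit:
--         return 0  # a row is already complete; the first column works
--     for col in range(width - 2):
--         r = 0
--         while r + 4 <= height and all(field[r + 1 + i][col + j] != 1 for i, j in cells):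
--             r += 1
--         fill = [0, 0, 0]
--         for i, j in cells:
--             if field[r + i][col + j] != 1:
--                 fill[i] += 1
--         if any(deficit[r + i] == fill[i] for i in range(3) if r + i < height):
--             return col
--     return -1
-- ===== Notes on version B (the rewrite author's own statement) =====
-- stated objective: faster
-- what changed: B drops A's per-column field copy and full-grid completeness rescan: it precomputes per-row counts of non-1 cells once and, after dropping the figure, decides completion from the 3 affected rows alone (with an upfront answer when some row is already complete).
-- outside the precondition, e.g. on tetris([[1, 1, 1], [0, 0]], [[0, 0, 0], [0, 1, 0], [0, 0, 0]]): A returns 0, B returns 0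
import Mathlib
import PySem

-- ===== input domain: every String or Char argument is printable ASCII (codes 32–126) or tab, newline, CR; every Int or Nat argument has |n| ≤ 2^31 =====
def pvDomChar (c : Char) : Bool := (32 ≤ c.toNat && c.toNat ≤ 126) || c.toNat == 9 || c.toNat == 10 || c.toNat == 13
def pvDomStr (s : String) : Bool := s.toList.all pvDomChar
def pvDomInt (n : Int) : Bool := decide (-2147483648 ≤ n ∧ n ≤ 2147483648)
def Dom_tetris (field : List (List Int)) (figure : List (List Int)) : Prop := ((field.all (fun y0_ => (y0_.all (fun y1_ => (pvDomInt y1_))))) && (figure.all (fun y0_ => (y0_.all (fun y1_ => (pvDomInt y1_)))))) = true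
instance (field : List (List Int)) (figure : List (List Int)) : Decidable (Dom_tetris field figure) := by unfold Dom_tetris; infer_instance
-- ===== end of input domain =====

-- B drops the per-column field copy and full-field rescan of A: it precomputes per-row
-- counts of non-1 cells once and decides completion from the 3 affected rows only
-- (objective: faster). Return-value equivalence on Pre_tetris is proved below.

-- ===== PORT A =====
-- shared cell access: Python's g[r][c] for the in-range nonnegative indices Pre_ admits
def pvCell (g : List (List Int)) (r c : Nat) : Int := (g.getD r []).getD c 0

def pvCanPlace (field figure : List (List Int)) (r c : Nat) : Bool :=
  (List.range 3).all fun i => (List.range 3).all fun j =>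
    !(pvCell figure i j == 1 && pvCell field (r + i) (c + j) == 1)

def pvDropA (field figure : List (List Int)) (c r : Nat) : Nat :=
  if _h : field.length < (r + 1) + 3 then r
  else if pvCanPlace field figure (r + 1) c = false then r
  else pvDropA field figure c (r + 1)
termination_by field.length - r
decreasing_by omega

-- the two nested write loops of A, as nested folds over the same indices
def pvWriteA (field figure : List (List Int)) (r c : Nat) : List (List Int) :=
  (List.range 3).foldl (fun nf i => (List.range 3).foldl (fun nf j =>
    if pvCell figure i j == 1 then nf.modify (r + i) (fun row => row.set (c + j) 1) else nf) nf) field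

def pvLoopA (field figure : List (List Int)) : List Nat → Int
  | [] => -1
  | c :: rest =>
      let r := pvDropA field figure c 0
      let nf := pvWriteA field figure r c
      if nf.any (fun row => row.all (fun x => x == 1)) then (c : Int)
      else pvLoopA field figure rest

-- range(0, width-3+1) = range(width-2) for every Python width; Nat subtraction makes
-- 'width - 2' the exact port (width-3+1 in Nat would be wrong for width = 0)
def tetris (field : List (List Int)) (figure : List (List Int)) : Int :=
  pvLoopA field figure (List.range ((field.headD []).length - 2))

-- ===== PORT B =====
def pvDeficits (field : List (List Int)) : List Int :=
  field.map (fun row => row.foldl (fun s x => if !(x == 1) then s + 1 else s) 0)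

def pvCells (figure : List (List Int)) : List (Nat × Nat) :=
  (((List.range 3).flatMap fun i => (List.range 3).map fun j => (i, j)).filter
    (fun p => pvCell figure p.1 p.2 == 1))

def pvDropB (field : List (List Int)) (cells : List (Nat × Nat)) (c r : Nat) : Nat :=
  if _h : r + 4 ≤ field.length then
    if cells.all (fun p => !(pvCell field ((r + 1) + p.1) (c + p.2) == 1))
    then pvDropB field cells c (r + 1) else r
  else r
termination_by field.length - r
decreasing_by omega

def pvFillB (field : List (List Int)) (cells : List (Nat × Nat)) (r c : Nat) : List Int :=
  cells.foldl (fun fill p =>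
    if !(pvCell field (r + p.1) (c + p.2) == 1) then fill.modify p.1 (· + 1) else fill) [0, 0, 0]

def pvLoopB (field : List (List Int)) (deficit : List Int) (cells : List (Nat × Nat)) : List Nat → Int
  | [] => -1
  | c :: rest =>
      let r := pvDropB field cells c 0
      let fill := pvFillB field cells r c
      if (List.range 3).any (fun i =>
            decide (r + i < field.length) && (deficit.getD (r + i) 0 == fill.getD i 0))
      then (c : Int) else pvLoopB field deficit cells rest

def tetris_alt (field : List (List Int)) (figure : List (List Int)) : Int :=
  if (field.headD []).length < 3 then -1
  else
    let deficit := pvDeficits field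
    if deficit.contains 0 then 0
    else pvLoopB field deficit (pvCells figure) (List.range ((field.headD []).length - 2))

-- ===== PRECONDITION & SPEC =====
-- Pre_ excludes inputs where A's 3x3 indexing raises IndexError: empty fields; and, when the
-- field is at least 3 wide, undersized figures, and — only when the figure has any 1-cell —
-- fields with a row shorter than row 0 or too few rows for the figure's lowest 1-row.
-- This is slightly narrower than 'A raises': on a ragged or too-short field A happens to
-- return when its figure's 1-cells dodge every missing cell (see cites in the claim).
def Pre_tetris (field : List (List Int)) (figure : List (List Int)) : Prop :=
  field ≠ [] ∧
  (3 ≤ (field.headD []).length →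
    3 ≤ figure.length ∧ (∀ row ∈ figure.take 3, 3 ≤ row.length) ∧
    ((∃ i < 3, ∃ j < 3, (figure.getD i []).getD j 0 = 1) →
      (∀ row ∈ field, (field.headD []).length ≤ row.length) ∧
      (∀ i < 3, (∃ j < 3, (figure.getD i []).getD j 0 = 1) → i < field.length)))
instance (field : List (List Int)) (figure : List (List Int)) : Decidable (Pre_tetris field figure) := by
  unfold Pre_tetris; infer_instance

def pvWitness_tetris : List (List Int) × List (List Int) :=
  ([[1, 0, 1], [1, 0, 1], [1, 0, 1]], [[0, 1, 0], [0, 1, 0], [0, 1, 0]])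

def Spec_tetris (field : List (List Int)) (figure : List (List Int)) (out : Int) : Prop := out = tetris_alt field figure
instance (field : List (List Int)) (figure : List (List Int)) (out : Int) : Decidable (Spec_tetris field figure out) := by unfold Spec_tetris; infer_instance

-- ===== CLAIM (what is proved, stated in full; the proofs are below) =====
def Claim_equal_tetris : Prop := ∀ (field : List (List Int)) (figure : List (List Int)), Dom_tetris field figure → Pre_tetris field figure → Spec_tetris field figure (tetris field figure)

-- ===== LEMMAS AND PROOFS =====
theorem canPlace_iff (field figure : List (List Int)) (r c : Nat) :
    pvCanPlace field figure r c = true ↔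
    ∀ i < 3, ∀ j < 3, pvCell figure i j = 1 → ¬ pvCell field (r + i) (c + j) = 1 := by
  simp only [pvCanPlace, List.all_eq_true, List.mem_range, Bool.not_eq_true',
    Bool.and_eq_false_iff, beq_eq_false_iff_ne, ne_eq]
  constructor
  · intro h i hi j hj hf
    rcases h i hi j hj with h' | h' <;> tauto
  · intro h i hi j hj
    by_cases hf : pvCell figure i j = 1
    · exact Or.inr (h i hi j hj hf)
    · exact Or.inl hf

theorem cellsAll_iff (figure : List (List Int)) (P : Nat × Nat → Bool) :
    ((pvCells figure).all P = true ↔ ∀ i < 3, ∀ j < 3, pvCell figure i j = 1 → P (i, j) = true) := by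
  simp only [pvCells, List.all_eq_true, List.mem_filter, List.mem_flatMap, List.mem_range,
    List.mem_map, beq_iff_eq]
  constructor
  · intro h i hi j hj hf
    exact h (i, j) ⟨⟨i, hi, ⟨j, hj, rfl⟩⟩, hf⟩
  · intro h p hp
    obtain ⟨hmem, hf⟩ := hp
    obtain ⟨i', hi', j', hj', heq⟩ := hmem
    subst heq
    exact h i' hi' j' hj' hf

theorem cells_all_eq_canPlace (field figure : List (List Int)) (r c : Nat) :
    ((pvCells figure).all fun p => !(pvCell field (r + p.1) (c + p.2) == 1))
      = pvCanPlace field figure r c := by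
  rw [Bool.eq_iff_iff, cellsAll_iff, canPlace_iff]
  simp

theorem dropA_eq (field figure : List (List Int)) (c r : Nat) :
    pvDropA field figure c r = pvDropB field (pvCells figure) c r := by
  fun_induction pvDropA field figure c r with
  | case1 r h => rw [pvDropB]; simp; omega
  | case2 r h hcp =>
      rw [pvDropB]
      rw [dif_pos (by omega : r + 4 ≤ field.length), if_neg]
      rw [cells_all_eq_canPlace, hcp]
      simp
  | case3 r h hcp ih =>
      rw [pvDropB, dif_pos (by omega : r + 4 ≤ field.length),
        if_pos (by rw [cells_all_eq_canPlace]; simpa using hcp)]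
      exact ih

theorem dropB_bound (field : List (List Int)) (cells : List (Nat × Nat)) (c r : Nat) :
    pvDropB field cells c r = r ∨ pvDropB field cells c r + 3 ≤ field.length := by
  fun_induction pvDropB field cells c r with
  | case1 r h hall ih => rcases ih with h' | h' <;> [right; right] <;> omega
  | case2 r h hall => left; rfl
  | case3 r h => left; rfl

-- small facts about List.modify / List.set used to reshape A's write loops
theorem modify_modify_same {α : Type} (l : List α) (i : Nat) (f g : α → α) :
    (l.modify i f).modify i g = l.modify i (fun x => g (f x)) := by
  apply List.ext_getElem
  · simp
  · intro k h1 h2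
    simp only [List.getElem_modify]
    split <;> simp_all

theorem getD_set {α : Type} (l : List α) (i x : Nat) (a d : α) :
    (l.set i a).getD x d = if i = x ∧ x < l.length then a else l.getD x d := by
  rw [List.getD_eq_getElem?_getD, List.getD_eq_getElem?_getD, List.getElem?_set]
  split_ifs with h1 h2 h3 h3 <;> simp_all [le_of_not_gt]

theorem getD_modify {α : Type} (l : List α) (i x : Nat) (f : α → α) (d : α) (hx : x < l.length) :
    (l.modify i f).getD x d = if i = x then f (l.getD x d) else l.getD x d := by
  have hx' : x < (l.modify i f).length := by simpa using hx
  rw [List.getD_eq_getElem?_getD, List.getElem?_eq_getElem hx', List.getElem_modify]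
  rw [List.getD_eq_getElem?_getD, List.getElem?_eq_getElem hx]
  simp

-- counting a predicate over a row = counting the indices where it holds
theorem countP_indices (row : List Int) (p : Int → Bool) :
    row.countP p = (List.range row.length).countP (fun x => p (row.getD x 0)) := by
  induction row with
  | nil => simp
  | cons a l ih =>
      rw [List.length_cons, List.range_succ_eq_map, List.countP_cons, List.countP_cons,
        List.countP_map, ih]
      have hc : List.countP (fun x => p (l.getD x 0)) (List.range l.length)
          = List.countP ((fun x => p ((a :: l).getD x 0)) ∘ Nat.succ) (List.range l.length) :=
        List.countP_congr (fun x _ => by simp [Function.comp])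
      rw [← hc]
      simp


-- count over a nodup in-range index set equals the row count iff the set covers
-- every index where the predicate holds
theorem countP_subset_iff (row : List Int) (S : List Nat) (p : Int → Bool)
    (hnd : S.Nodup) (hin : ∀ x ∈ S, x < row.length) :
    (row.countP p = S.countP (fun x => p (row.getD x 0))) ↔
    (∀ x, x < row.length → p (row.getD x 0) = true → x ∈ S) := by
  set q : Nat → Bool := fun x => p (row.getD x 0) with hq
  have hsub : (S.filter q).Subperm ((List.range row.length).filter q) :=
    List.subperm_of_subset (hnd.filter q) (fun x hx => by
      simp only [List.mem_filter, List.mem_range] at hx ⊢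
      exact ⟨hin x hx.1, hx.2⟩)
  rw [countP_indices, List.countP_eq_length_filter, List.countP_eq_length_filter]
  constructor
  · intro hlen x hx hqx
    have hperm := hsub.perm_of_length_le (le_of_eq hlen)
    have hm : x ∈ (List.range row.length).filter q := by
      simp only [List.mem_filter, List.mem_range]
      exact ⟨hx, hqx⟩
    exact (List.mem_filter.mp (hperm.mem_iff.mpr hm)).1
  · intro h
    have hsub2 : ((List.range row.length).filter q).Subperm (S.filter q) :=
      List.subperm_of_subset (List.nodup_range.filter q) (fun x hx => by
        simp only [List.mem_filter, List.mem_range] at hx ⊢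
        exact ⟨h x hx.1 hx.2, hx.2⟩)
    exact le_antisymm hsub2.length_le hsub.length_le

-- the inner write loop of A restricted to one row
def pvRowWrite (figure : List (List Int)) (i c : Nat) (row : List Int) : List Int :=
  (List.range 3).foldl (fun row j => if pvCell figure i j == 1 then row.set (c + j) 1 else row) row

theorem foldl_cond_modify {α : Type} (js : List Nat) (k : Nat) (P : Nat → Bool)
    (f : Nat → List α → List α) (nf : List (List α)) :
    js.foldl (fun nf j => if P j then nf.modify k (f j) else nf) nf
      = nf.modify k (fun row => js.foldl (fun row j => if P j then f j row else row) row) := by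
  induction js generalizing nf with
  | nil => exact (List.modify_id k nf).symm
  | cons j js ih =>
      simp only [List.foldl_cons]
      rw [ih]
      by_cases h : P j
      · simp only [if_pos h, modify_modify_same]
      · simp only [if_neg h]

theorem writeA_modify (field figure : List (List Int)) (r c : Nat) :
    pvWriteA field figure r c =
      ((field.modify r (pvRowWrite figure 0 c)).modify (r + 1)
        (pvRowWrite figure 1 c)).modify (r + 2) (pvRowWrite figure 2 c) := by
  have h0 : pvWriteA field figure r c =
      (List.range 3).foldl (fun nf j => if pvCell figure 2 j == 1 then nf.modify (r + 2) (fun row => row.set (c + j) 1) else nf)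
        ((List.range 3).foldl (fun nf j => if pvCell figure 1 j == 1 then nf.modify (r + 1) (fun row => row.set (c + j) 1) else nf)
          ((List.range 3).foldl (fun nf j => if pvCell figure 0 j == 1 then nf.modify (r + 0) (fun row => row.set (c + j) 1) else nf) field)) := rfl
  rw [h0, foldl_cond_modify, foldl_cond_modify, foldl_cond_modify]
  rfl

theorem rowWrite_length (figure : List (List Int)) (i c : Nat) (row : List Int) :
    (pvRowWrite figure i c row).length = row.length := by
  show ((List.range 3).foldl _ row).length = _
  induction List.range 3 generalizing row with
  | nil => rfl
  | cons j js ih =>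
      simp only [List.foldl_cons]
      rw [ih]
      by_cases h : pvCell figure i j == 1 <;> simp [h]

theorem writeA_length (field figure : List (List Int)) (r c : Nat) :
    (pvWriteA field figure r c).length = field.length := by
  rw [writeA_modify]; simp

theorem foldl_set_getD (c : Nat) (P : Nat → Bool) (js : List Nat) (row : List Int) (x : Nat)
    (hx : x < row.length) :
    (js.foldl (fun row j => if P j then row.set (c + j) 1 else row) row).getD x 0 =
      if ∃ j ∈ js, P j = true ∧ x = c + j then 1 else row.getD x 0 := by
  induction js generalizing row with
  | nil => simp
  | cons j js ih =>
      simp only [List.foldl_cons, List.exists_mem_cons_iff]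
      by_cases hP : P j
      · rw [if_pos hP, ih (row.set (c + j) 1) (by simpa using hx), getD_set]
        simp only [hP, true_and]
        by_cases hA : ∃ j' ∈ js, P j' = true ∧ x = c + j'
        · rw [if_pos hA, if_pos (Or.inr hA)]
        · by_cases hE : x = c + j
          · rw [if_neg hA, if_pos (⟨hE.symm, hx⟩ : c + j = x ∧ x < row.length),
              if_pos (Or.inl hE)]
          · rw [if_neg hA, if_neg (fun h => hE h.1.symm), if_neg (fun h => h.elim hE hA)]
      · rw [if_neg hP, ih row hx]
        have : ¬ (P j = true ∧ x = c + j) := fun h => hP h.1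
        simp [hP]

theorem rowWrite_getD (figure : List (List Int)) (i c : Nat) (row : List Int) (x : Nat)
    (hx : x < row.length) :
    (pvRowWrite figure i c row).getD x 0 =
      if ∃ j ∈ List.range 3, pvCell figure i j = 1 ∧ x = c + j then 1 else row.getD x 0 := by
  rw [pvRowWrite, foldl_set_getD c (fun j => pvCell figure i j == 1) _ row x hx]
  congr 1
  simp

theorem all_one_iff (row : List Int) :
    (row.all fun x => x == 1) = true ↔ ∀ x, x < row.length → row.getD x 0 = 1 := by
  simp only [List.all_eq_true, beq_iff_eq]
  constructor
  · intro h x hxl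
    rw [List.getD_eq_getElem?_getD, List.getElem?_eq_getElem hxl]
    exact h _ (List.getElem_mem hxl)
  · intro h v hv
    obtain ⟨x, hxl, rfl⟩ := List.mem_iff_getElem.mp hv
    have := h x hxl
    rwa [List.getD_eq_getElem?_getD, List.getElem?_eq_getElem hxl] at this

-- row r+i of the written field is complete iff the row's deficit is exactly what the
-- figure's 1-cells of its row i fill in
theorem complete_rowWrite (figure : List (List Int)) (i c : Nat) (row : List Int)
    (hlen : ∀ j ∈ List.range 3, pvCell figure i j = 1 → c + j < row.length) :
    (((pvRowWrite figure i c row).all fun x => x == 1) = true ↔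
      row.countP (fun x => !(x == 1)) =
        ((List.range 3).filter (fun j => pvCell figure i j == 1)).countP
          (fun j => !(row.getD (c + j) 0 == 1))) := by
  set S : List Nat := ((List.range 3).filter (fun j => pvCell figure i j == 1)).map (c + ·) with hS
  have hnd : S.Nodup :=
    (List.nodup_range.filter _).map (fun a b h => by omega)
  have hin : ∀ x ∈ S, x < row.length := by
    intro x hxS
    obtain ⟨j, hj, rfl⟩ := List.mem_map.mp hxS
    have := List.mem_filter.mp hj
    exact hlen j this.1 (by simpa using this.2)
  have hcount : S.countP (fun x => !(row.getD x 0 == 1)) =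
      ((List.range 3).filter (fun j => pvCell figure i j == 1)).countP
        (fun j => !(row.getD (c + j) 0 == 1)) := by
    rw [hS, List.countP_map]
    rfl
  rw [← hcount, countP_subset_iff row S _ hnd hin]
  have hl : (pvRowWrite figure i c row).length = row.length := rowWrite_length figure i c row
  rw [all_one_iff]
  constructor
  · intro h x hxl hne
    have hx' := h x (by omega)
    rw [rowWrite_getD figure i c row x hxl] at hx'
    by_cases hcov : ∃ j ∈ List.range 3, pvCell figure i j = 1 ∧ x = c + j
    · obtain ⟨j, hj3, hfig, rfl⟩ := hcov
      exact List.mem_map.mpr ⟨j, List.mem_filter.mpr ⟨hj3, by simpa using hfig⟩, rfl⟩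
    · rw [if_neg hcov] at hx'
      rw [hx'] at hne
      simp at hne
  · intro h x hxl
    rw [hl] at hxl
    rw [rowWrite_getD figure i c row x hxl]
    by_cases hcov : ∃ j ∈ List.range 3, pvCell figure i j = 1 ∧ x = c + j
    · rw [if_pos hcov]
    · rw [if_neg hcov]
      by_contra hne
      have hmem := h x hxl (by simpa using hne)
      obtain ⟨j, hj, hxe⟩ := List.mem_map.mp hmem
      have hf := List.mem_filter.mp hj
      exact hcov ⟨j, hf.1, by simpa using hf.2, hxe.symm⟩

-- deficits list: entry k is the count of non-1 cells of row k
theorem deficits_getD (field : List (List Int)) (k : Nat) (hk : k < field.length) :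
    (pvDeficits field).getD k 0 = ((field.getD k []).countP (fun x => !(x == 1)) : Int) := by
  rw [pvDeficits, List.getD_eq_getElem?_getD, List.getElem?_map,
    List.getElem?_eq_getElem hk]
  simp only [Option.map_some, Option.getD_some]
  rw [PySem.List.foldl_count_if (fun x => !(x == 1)) field[k] 0]
  rw [List.getD_eq_getElem?_getD, List.getElem?_eq_getElem hk]
  simp

theorem deficits_length (field : List (List Int)) : (pvDeficits field).length = field.length := by
  simp [pvDeficits]

theorem deficits_contains_zero (field : List (List Int)) :
    ((pvDeficits field).contains 0 = true) ↔
      ∃ k, ∃ _ : k < field.length, (field.getD k []).countP (fun x => !(x == 1)) = 0 := by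
  rw [List.contains_iff_exists_mem_beq]
  constructor
  · rintro ⟨v, hv, hbeq⟩
    obtain ⟨k, hk, rfl⟩ := List.mem_iff_getElem.mp hv
    rw [deficits_length] at hk
    refine ⟨k, hk, ?_⟩
    have : (pvDeficits field).getD k 0 = (0 : Int) := by
      rw [List.getD_eq_getElem?_getD, List.getElem?_eq_getElem (by simpa [deficits_length] using hk)]
      simp at hbeq ⊢
      omega
    rw [deficits_getD field k hk] at this
    exact_mod_cast this
  · rintro ⟨k, hk, hc⟩
    refine ⟨(pvDeficits field).getD k 0, ?_, ?_⟩
    · rw [List.getD_eq_getElem?_getD, List.getElem?_eq_getElem (by simpa [deficits_length] using hk)]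
      exact List.getElem_mem _
    · rw [deficits_getD field k hk, hc]
      simp

-- B's fill counters: entry i counts the figure's 1-cells of row i that land on non-1 field cells
theorem foldl_fill_getD (field : List (List Int)) (r c : Nat) (cells : List (Nat × Nat)) :
    ∀ (acc : List Int) (i : Nat), i < acc.length →
      ((cells.foldl (fun fill p =>
          if !(pvCell field (r + p.1) (c + p.2) == 1) then fill.modify p.1 (· + 1) else fill) acc).getD i 0)
        = acc.getD i 0 +
          (cells.countP (fun p => p.1 == i && !(pvCell field (r + p.1) (c + p.2) == 1)) : Int) := by
  induction cells with
  | nil => simp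
  | cons q cells ih =>
      intro acc i hi
      simp only [List.foldl_cons, List.countP_cons]
      by_cases hq : (!(pvCell field (r + q.1) (c + q.2) == 1)) = true
      · rw [if_pos hq, ih _ i (by simpa using hi), getD_modify _ _ _ _ _ hi]
        by_cases hqi : q.1 = i
        · subst hqi
          simp only [beq_self_eq_true, Bool.true_and, hq, if_pos]
          push_cast
          ring
        · have hb : (q.1 == i) = false := by simpa using hqi
          simp only [if_neg hqi, hb, Bool.false_and]
          simp
      · rw [Bool.not_eq_true] at hq
        rw [if_neg (by simp [hq]), ih _ i hi]
        simp [hq]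

theorem fill_getD (field figure : List (List Int)) (r c : Nat) (i : Nat) (hi : i < 3) :
    (pvFillB field (pvCells figure) r c).getD i 0 =
      (((List.range 3).filter (fun j => pvCell figure i j == 1)).countP
        (fun j => !(pvCell field (r + i) (c + j) == 1)) : Int) := by
  rw [pvFillB, foldl_fill_getD field r c (pvCells figure) [0, 0, 0] i (by simpa using hi)]
  have hacc : ([0, 0, 0] : List Int).getD i 0 = 0 := by
    interval_cases i <;> rfl
  rw [hacc, zero_add]
  congr 1
  rw [pvCells, List.countP_filter, List.countP_filter]
  have hflat : ((List.range 3).flatMap fun i => (List.range 3).map fun j => (i, j))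
      = ((List.range 3).map fun j => ((0 : Nat), j)) ++ ((List.range 3).map fun j => ((1 : Nat), j))
        ++ ((List.range 3).map fun j => ((2 : Nat), j)) := rfl
  rw [hflat, List.countP_append, List.countP_append, List.countP_map, List.countP_map,
    List.countP_map]
  interval_cases i <;>
    · simp only [Function.comp_def]
      simp

theorem any_iff_getD (L : List (List Int)) (P : List Int → Bool) :
    (L.any P = true) ↔ ∃ k, k < L.length ∧ P (L.getD k []) = true := by
  rw [List.any_eq_true]
  constructor
  · rintro ⟨row, hmem, hp⟩
    obtain ⟨k, hk, rfl⟩ := List.mem_iff_getElem.mp hmem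
    exact ⟨k, hk, by rwa [List.getD_eq_getElem?_getD, List.getElem?_eq_getElem hk]⟩
  · rintro ⟨k, hk, hp⟩
    exact ⟨L[k], List.getElem_mem hk,
      by rwa [List.getD_eq_getElem?_getD, List.getElem?_eq_getElem hk] at hp⟩

theorem writeA_getD (field figure : List (List Int)) (r c k : Nat) (hk : k < field.length) :
    (pvWriteA field figure r c).getD k [] =
      if k = r + 2 then pvRowWrite figure 2 c (field.getD k [])
      else if k = r + 1 then pvRowWrite figure 1 c (field.getD k [])
      else if k = r then pvRowWrite figure 0 c (field.getD k [])
      else field.getD k [] := by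
  rw [writeA_modify]
  rw [getD_modify _ _ _ _ _ (by simpa using hk), getD_modify _ _ _ _ _ (by simpa using hk),
    getD_modify _ _ _ _ _ hk]
  by_cases h2 : k = r + 2
  · rw [if_pos (by omega : r + 2 = k), if_neg (by omega : ¬ r + 1 = k),
      if_neg (by omega : ¬ r = k), if_pos h2]
  · rw [if_neg (by omega : ¬ r + 2 = k), if_neg h2]
    by_cases h1 : k = r + 1
    · rw [if_pos (by omega : r + 1 = k), if_neg (by omega : ¬ r = k), if_pos h1]
    · rw [if_neg (by omega : ¬ r + 1 = k), if_neg h1]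
      by_cases h0 : k = r
      · rw [if_pos (by omega : r = k), if_pos h0]
      · rw [if_neg (by omega : ¬ r = k), if_neg h0]

-- writing only 1s keeps an already complete row complete
theorem rowWrite_preserves_all_one (figure : List (List Int)) (i c : Nat) (row : List Int)
    (h : (row.all fun x => x == 1) = true) :
    ((pvRowWrite figure i c row).all fun x => x == 1) = true := by
  show (((List.range 3).foldl _ row).all _) = true
  induction List.range 3 generalizing row with
  | nil => exact h
  | cons j js ih =>
      simp only [List.foldl_cons]
      by_cases hP : pvCell figure i j == 1
      · rw [if_pos hP]
        refine ih _ ?_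
        simp only [List.all_eq_true] at h ⊢
        intro x hx
        rcases List.mem_or_eq_of_mem_set hx with hx' | rfl
        · exact h x hx'
        · simp
      · rw [if_neg hP]
        exact ih _ h

-- the heart of the equivalence: when no field row is already complete, A's
-- copy-write-and-rescan test at (r, c) agrees with B's deficit/fill test
theorem percol (field figure : List (List Int)) (c r : Nat)
    (hr3 : ∀ i, i < 3 → (∃ j < 3, pvCell figure i j = 1) → r + i < field.length)
    (hlen : (∃ i < 3, ∃ j < 3, pvCell figure i j = 1) →
      ∀ k, k < field.length → c + 3 ≤ (field.getD k []).length)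
    (hnz : ∀ k, k < field.length → (field.getD k []).countP (fun x => !(x == 1)) ≠ 0) :
    ((pvWriteA field figure r c).any fun row => row.all fun x => x == 1) =
    ((List.range 3).any fun i => decide (r + i < field.length) &&
      ((pvDeficits field).getD (r + i) 0 == (pvFillB field (pvCells figure) r c).getD i 0)) := by
  have hrowlen : ∀ i, i < 3 → (∃ j < 3, pvCell figure i j = 1) →
      ∀ k, k < field.length → ∀ j ∈ List.range 3, pvCell figure i j = 1 →
        c + j < (field.getD k []).length := by
    intro i hi hex k hk j hj hfig
    have := hlen ⟨i, hi, hex⟩ k hk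
    have hj3 := List.mem_range.mp hj
    omega
  rw [Bool.eq_iff_iff, any_iff_getD, List.any_eq_true]
  have hwl : (pvWriteA field figure r c).length = field.length := writeA_length field figure r c
  -- characterization of a touched row i being complete, when row r+i exists
  have htouch : ∀ i, i < 3 → r + i < field.length →
      (((pvRowWrite figure i c (field.getD (r + i) [])).all fun x => x == 1) = true ↔
        ((pvDeficits field).getD (r + i) 0 = (pvFillB field (pvCells figure) r c).getD i 0)) := by
    intro i hi hk
    rw [deficits_getD field (r + i) hk, fill_getD field figure r c i hi]
    rw [complete_rowWrite figure i c (field.getD (r + i) []) ?hl]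
    · constructor
      · intro h; exact_mod_cast congrArg (Nat.cast : Nat → Int) h
      · intro h; exact_mod_cast h
    · intro j hj hfig
      exact hrowlen i hi ⟨j, List.mem_range.mp hj, hfig⟩ (r + i) hk j hj hfig
  constructor
  · rintro ⟨k, hk, hall⟩
    rw [hwl] at hk
    rw [writeA_getD field figure r c k hk] at hall
    by_cases h2 : k = r + 2
    · subst h2
      rw [if_pos rfl] at hall
      refine ⟨2, by simp, ?_⟩
      simp only [decide_eq_true_eq, Bool.and_eq_true, beq_iff_eq]
      exact ⟨by simpa using hk, (htouch 2 (by omega) hk).mp hall⟩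
    · rw [if_neg h2] at hall
      by_cases h1 : k = r + 1
      · subst h1
        rw [if_pos rfl] at hall
        refine ⟨1, by simp, ?_⟩
        simp only [Bool.and_eq_true, decide_eq_true_iff, beq_iff_eq]
        exact ⟨hk, (htouch 1 (by omega) hk).mp hall⟩
      · rw [if_neg h1] at hall
        by_cases h0 : k = r
        · subst h0
          rw [if_pos rfl] at hall
          refine ⟨0, by simp, ?_⟩
          simp only [Bool.and_eq_true, decide_eq_true_iff, beq_iff_eq]
          exact ⟨by simpa using hk, (htouch 0 (by omega) (by simpa using hk)).mp (by simpa using hall)⟩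
        · rw [if_neg h0] at hall
          exfalso
          apply hnz k hk
          rw [List.countP_eq_zero]
          intro a ha
          simp only [List.all_eq_true] at hall
          simp [hall a ha]
  · rintro ⟨i, hi3, hcond⟩
    have hi : i < 3 := List.mem_range.mp hi3
    simp only [Bool.and_eq_true, decide_eq_true_iff, beq_iff_eq] at hcond
    obtain ⟨hkH, heq⟩ := hcond
    refine ⟨r + i, by omega, ?_⟩
    rw [writeA_getD field figure r c (r + i) hkH]
    interval_cases i
    · rw [if_neg (by omega), if_neg (by omega), if_pos (by omega)]
      exact (htouch 0 (by omega) hkH).mpr heq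
    · rw [if_neg (by omega), if_pos rfl]
      exact (htouch 1 (by omega) hkH).mpr heq
    · rw [if_pos rfl]
      exact (htouch 2 (by omega) hkH).mpr heq

-- fold the per-column equivalence over the column list
theorem loop_eq (field figure : List (List Int))
    (hlenW : (∃ i < 3, ∃ j < 3, pvCell figure i j = 1) →
      ∀ k, k < field.length → (field.headD []).length ≤ (field.getD k []).length)
    (hrows : ∀ i < 3, (∃ j < 3, pvCell figure i j = 1) → i < field.length)
    (hnz : ∀ k, k < field.length → (field.getD k []).countP (fun x => !(x == 1)) ≠ 0) :
    ∀ cols : List Nat, (∀ c ∈ cols, c + 3 ≤ (field.headD []).length) →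
      pvLoopA field figure cols = pvLoopB field (pvDeficits field) (pvCells figure) cols := by
  intro cols
  induction cols with
  | nil => intro _; rfl
  | cons c rest ih =>
      intro hc
      simp only [pvLoopA, pvLoopB]
      rw [dropA_eq]
      set r := pvDropB field (pvCells figure) c 0 with hrdef
      have hr3 : ∀ i, i < 3 → (∃ j < 3, pvCell figure i j = 1) → r + i < field.length := by
        intro i hi hex
        rcases dropB_bound field (pvCells figure) c 0 with h0 | hb
        · rw [← hrdef] at h0
          have := hrows i hi hex
          omega
        · rw [← hrdef] at hb
          omega
      have hlen : (∃ i < 3, ∃ j < 3, pvCell figure i j = 1) →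
          ∀ k, k < field.length → c + 3 ≤ (field.getD k []).length := by
        intro hex k hk
        have h1 := hlenW hex k hk
        have h2 := hc c List.mem_cons_self
        omega
      rw [percol field figure c r hr3 hlen hnz]
      rw [ih (fun c' hc' => hc c' (List.mem_cons_of_mem c hc'))]

theorem tetris_spec_aux (field figure : List (List Int)) (hpre : Pre_tetris field figure) :
    tetris field figure = tetris_alt field figure := by
  obtain ⟨hne, hW⟩ := hpre
  by_cases hw : (field.headD []).length < 3
  · have h0 : (field.headD []).length - 2 = 0 := by omega
    rw [tetris, tetris_alt, if_pos hw, h0]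
    rfl
  · have h3 : 3 ≤ (field.headD []).length := by omega
    obtain ⟨_, _, hfig1⟩ := hW h3
    have hfig1' : (∃ i < 3, ∃ j < 3, pvCell figure i j = 1) →
        (∀ row ∈ field, (field.headD []).length ≤ row.length) ∧
        (∀ i < 3, (∃ j < 3, pvCell figure i j = 1) → i < field.length) := hfig1
    rw [tetris, tetris_alt, if_neg hw]
    simp only []
    by_cases hz : (pvDeficits field).contains 0
    · rw [if_pos hz]
      obtain ⟨k, hk, hdk⟩ := (deficits_contains_zero field).mp hz
      have hall : ((field.getD k []).all fun x => x == 1) = true := by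
        rw [List.all_eq_true]
        intro x hx
        have := List.countP_eq_zero.mp hdk x hx
        simpa using this
      have hW2 : (field.headD []).length - 2 = ((field.headD []).length - 3) + 1 := by omega
      rw [hW2, List.range_succ_eq_map]
      simp only [pvLoopA]
      have hcond : ((pvWriteA field figure (pvDropA field figure 0 0) 0).any
          fun row => row.all fun x => x == 1) = true := by
        rw [any_iff_getD]
        refine ⟨k, by simpa [writeA_length] using hk, ?_⟩
        rw [writeA_getD field figure _ 0 k hk]
        split_ifs <;>
          first
            | exact rowWrite_preserves_all_one figure _ 0 _ hall
            | exact hall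
      rw [if_pos hcond]
      simp
    · rw [if_neg hz]
      have hnz : ∀ k, k < field.length → (field.getD k []).countP (fun x => !(x == 1)) ≠ 0 := by
        intro k hk hcon
        exact hz ((deficits_contains_zero field).mpr ⟨k, hk, hcon⟩)
      have hlenW : (∃ i < 3, ∃ j < 3, pvCell figure i j = 1) →
          ∀ k, k < field.length → (field.headD []).length ≤ (field.getD k []).length := by
        intro hex k hk
        refine (hfig1' hex).1 (field.getD k []) ?_
        rw [List.getD_eq_getElem?_getD, List.getElem?_eq_getElem hk]
        exact List.getElem_mem hk
      have hrows : ∀ i < 3, (∃ j < 3, pvCell figure i j = 1) → i < field.length := by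
        intro i hi hex
        exact (hfig1' ⟨i, hi, hex⟩).2 i hi hex
      exact loop_eq field figure hlenW hrows hnz (List.range ((field.headD []).length - 2))
        (fun c hc => by have := List.mem_range.mp hc; omega)

-- ===== VERDICT (by name: the statement is the Claim_ definition above) =====
theorem tetris_spec : Claim_equal_tetris := by
  unfold Claim_equal_tetris Spec_tetris
  intro field figure _ hpre
  exact tetris_spec_aux field figure hpre
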